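-- pv_equiv track=rewrite | github.com/lubalu999/AutomataTheory | SyntaxTree.py | PrepareString
-- ===== SOURCE A (Python) =====
-- from itertools import groupby
--
-- def PrepareString(string, eclist):
--     for i in eclist.keys():
--         string = string.replace('%'+i+'%', eclist[i])
--     for i in range(len(string)):
--         groupped_str = groupby(string[i:])
--         for elem, grouper in groupped_str:
--             k = int(len(list(grouper)))
--             if (elem in ['*', '?']):
--                 if k > 1:
--                     string = string.replace(elem*k, elem)
--     return string
-- ===== SOURCE B (Python) =====
-- from itertools import groupby
--
-- def PrepareString(string, eclist):
--     for i in eclist.keys():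
--         string = string.replace('%'+i+'%', eclist[i])
--     return ''.join(c if c in '*?' else c * sum(1 for _ in g)
--                    for c, g in groupby(string))
-- ===== Notes on version B (the rewrite author's own statement) =====
-- stated objective: faster
-- what changed: After the same sequential key substitutions, B collapses runs of '*' and '?' with a single groupby pass that emits one char per special run, instead of A's loop over every suffix that re-runs groupby and performs global string.replace calls.
import Mathlib
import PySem

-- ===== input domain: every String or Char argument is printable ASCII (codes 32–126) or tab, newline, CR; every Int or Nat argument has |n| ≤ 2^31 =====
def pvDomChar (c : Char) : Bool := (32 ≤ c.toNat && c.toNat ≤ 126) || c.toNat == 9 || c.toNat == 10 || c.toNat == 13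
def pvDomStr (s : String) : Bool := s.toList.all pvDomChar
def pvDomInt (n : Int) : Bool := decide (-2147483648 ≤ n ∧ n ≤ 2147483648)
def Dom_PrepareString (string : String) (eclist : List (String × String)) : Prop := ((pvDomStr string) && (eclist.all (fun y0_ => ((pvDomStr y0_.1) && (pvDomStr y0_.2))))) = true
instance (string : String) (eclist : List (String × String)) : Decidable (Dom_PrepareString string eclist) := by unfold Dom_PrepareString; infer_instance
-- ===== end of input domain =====

-- B (objective: faster, measured) collapses runs of '*'/'?' in one groupby pass instead of A's per-suffix groupby + global replace loop.

-- ===== PORT A =====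
-- shared phase 1 (identical in both Pythons): substitute '%key%' by its value, key by key
def pvSubst (string : String) (eclist : List (String × String)) : String :=
  let d := PySem.Dict.ofList eclist
  d.keys.foldl (fun s k => PySem.Str.replace s ("%" ++ k ++ "%") (d.getD k "")) string

-- itertools.groupby over a list of characters: list of (element, group length)
def pvGroupby : List Char → List (Char × Nat)
  | [] => []
  | c :: t =>
    match pvGroupby t with
    | [] => [(c, 1)]
    | (d, m) :: rs => if c = d then (c, m + 1) :: rs else (c, 1) :: (d, m) :: rs

def PrepareString (string : String) (eclist : List (String × String)) : String :=
  let s1 := pvSubst string eclist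
  let cs0 := s1.toList
  String.mk ((PySem.List.pyRange 0 cs0.length 1).foldl
    (fun cs i =>
      (pvGroupby (PySem.Chars.slice cs (some i) none)).foldl
        (fun cs p =>
          if p.1 ∈ (['*', '?'] : List Char) then
            (if p.2 > 1 then PySem.Chars.replace cs (List.replicate p.2 p.1) [p.1] else cs)
          else cs)
        cs)
    cs0)

-- ===== PORT B =====
def PrepareString_alt (string : String) (eclist : List (String × String)) : String :=
  let s1 := pvSubst string eclist
  String.mk ((pvGroupby s1.toList).flatMap
    (fun p => if p.1 == '*' || p.1 == '?' then [p.1] else List.replicate p.2 p.1))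

-- ===== PRECONDITION & SPEC =====
def Spec_PrepareString (string : String) (eclist : List (String × String)) (out : String) : Prop := out = PrepareString_alt string eclist
instance (string : String) (eclist : List (String × String)) (out : String) : Decidable (Spec_PrepareString string eclist out) := by unfold Spec_PrepareString; infer_instance

-- ===== CLAIM (what is proved, stated in full; the proofs are below) =====
def Claim_equal_PrepareString : Prop := ∀ (string : String) (eclist : List (String × String)), Dom_PrepareString string eclist → Spec_PrepareString string eclist (PrepareString string eclist)

-- ===== LEMMAS AND PROOFS =====

-- run-length view: a run list and the string it denotes
def pvFrom (rs : List (Char × Nat)) : List Char := rs.flatMap (fun p => List.replicate p.2 p.1)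

def pvSpec (c : Char) : Bool := c == '*' || c == '?'

-- effect of one global replace of c^k by c on one run
def pvF (c : Char) (k : Nat) (p : Char × Nat) : Char × Nat :=
  if p.1 = c then (p.1, p.2 % k + p.2 / k) else p

-- accumulated effect of the inner group loop on one run
def pvFof : List (Char × Nat) → (Char × Nat) → (Char × Nat)
  | [], p => p
  | g :: gs, p => pvFof gs (if pvSpec g.1 && decide (g.2 > 1) then pvF g.1 g.2 p else p)

def pvPos (rs : List (Char × Nat)) : Prop := ∀ p ∈ rs, 1 ≤ p.2
def pvChain (rs : List (Char × Nat)) : Prop := List.IsChain (fun p q => p.1 ≠ q.1) rs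
def pvGood (p : Char × Nat) : Prop := pvSpec p.1 = true → p.2 = 1
def pvShadow (rs : List (Char × Nat)) : List (Char × Nat) :=
  rs.map (fun p => if pvSpec p.1 then (p.1, 1) else p)
def pvSum (rs : List (Char × Nat)) : Nat := (rs.map (·.2)).sum

-- every "bad" run (a special char with count ≥ 2) starts at offset ≥ i
def pvGoodUpto : Int → List (Char × Nat) → Prop
  | _, [] => True
  | i, p :: rs => (pvSpec p.1 = true → 2 ≤ p.2 → i ≤ 0) ∧ pvGoodUpto (i - p.2) rs

-- fuel-free reformulation of PySem.Chars.replace.go for pattern c^k, target [c]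
def pvScan (c : Char) (k : Nat) : List Char → List Char → List Char
  | [], acc => acc.reverse
  | ch :: t, acc =>
    if (List.replicate k c).isPrefixOf (ch :: t) then pvScan c k (t.drop (k - 1)) (c :: acc)
    else pvScan c k t (ch :: acc)
  termination_by l _ => l.length
  decreasing_by
    · simp only [List.length_drop, List.length_cons]; omega
    · simp only [List.length_cons]; omega

theorem pvPrefix_cons_ne (c d : Char) (k : Nat) (hk : 1 ≤ k) (hd : d ≠ c) (l : List Char) :
    (List.replicate k c).isPrefixOf (d :: l) = false := by
  obtain ⟨j, rfl⟩ : ∃ j, k = j + 1 := ⟨k - 1, by omega⟩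
  simp only [List.replicate_succ, List.isPrefixOf_cons₂, Bool.and_eq_false_iff]
  left
  exact beq_eq_false_iff_ne.mpr (fun h => hd h.symm)

theorem pvRep_shift (d : Char) (m : Nat) (acc : List Char) :
    List.replicate m d ++ d :: acc = d :: (List.replicate m d ++ acc) := by
  induction m with
  | zero => rfl
  | succ m ih => simp [List.replicate_succ, ih]

theorem pvGo_eq_scan (c : Char) (k : Nat) (hk : 1 ≤ k) :
    ∀ (fuel : Nat) (l acc : List Char), l.length ≤ fuel →
      PySem.Chars.replace.go (List.replicate k c) [c] fuel l acc = pvScan c k l acc := by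
  intro fuel
  induction fuel with
  | zero =>
    intro l acc hl
    have hnil : l = [] := List.eq_nil_of_length_eq_zero (by omega)
    subst hnil
    simp [PySem.Chars.replace.go, pvScan]
  | succ fuel ih =>
    intro l acc hl
    cases l with
    | nil => simp [PySem.Chars.replace.go, pvScan]
    | cons ch t =>
      rw [PySem.Chars.replace.go, pvScan]
      by_cases hpre : (List.replicate k c).isPrefixOf (ch :: t) = true
      · rw [if_pos hpre, if_pos hpre]
        have hdrop : List.drop (List.replicate k c).length (ch :: t) = t.drop (k - 1) := by
          rw [List.length_replicate]
          obtain ⟨j, rfl⟩ : ∃ j, k = j + 1 := ⟨k - 1, by omega⟩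
          simp
        rw [hdrop]
        have hrev : ([c] : List Char).reverse ++ acc = c :: acc := rfl
        rw [hrev]
        apply ih
        have := List.length_drop (l := t) (i := k - 1)
        simp only [List.length_cons] at hl
        omega
      · rw [if_neg hpre, if_neg hpre]
        apply ih
        simp only [List.length_cons] at hl
        omega

theorem pvReplace_eq_scan (c : Char) (k : Nat) (hk : 1 ≤ k) (l : List Char) :
    PySem.Chars.replace l (List.replicate k c) [c] = pvScan c k l [] := by
  unfold PySem.Chars.replace
  have hne : (List.replicate k c).isEmpty = false := by
    obtain ⟨j, rfl⟩ : ∃ j, k = j + 1 := ⟨k - 1, by omega⟩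
    simp [List.replicate_succ]
  rw [hne]
  simp only [Bool.false_eq_true, if_false]
  exact pvGo_eq_scan c k hk l.length l [] (le_refl _)

theorem pvPrefix_iff (c : Char) (k m : Nat) (t : List Char) (ht : t.head? ≠ some c) :
    (List.replicate k c).isPrefixOf (List.replicate m c ++ t) = true ↔ k ≤ m := by
  induction k generalizing m t with
  | zero => simp
  | succ k ih =>
    cases m with
    | zero =>
      simp only [List.replicate_zero, List.nil_append]
      constructor
      · intro h
        exfalso
        cases t with
        | nil => simp [List.replicate_succ] at h
        | cons x t' =>
          have hx : x ≠ c := by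
            intro he
            rw [List.head?_cons, he] at ht
            exact ht rfl
          rw [pvPrefix_cons_ne c x (k + 1) (by omega) hx] at h
          cases h
      · omega
    | succ m =>
      rw [List.replicate_succ, List.replicate_succ, List.cons_append,
        List.isPrefixOf_cons₂]
      simp only [beq_self_eq_true, Bool.true_and]
      rw [ih m t ht]
      omega

theorem pvScan_nonc_run (c : Char) (k : Nat) (hk : 1 ≤ k) (d : Char) (hd : d ≠ c)
    (m : Nat) (t acc : List Char) :
    pvScan c k (List.replicate m d ++ t) acc = pvScan c k t (List.replicate m d ++ acc) := by
  induction m generalizing acc with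
  | zero => simp
  | succ m ih =>
    rw [List.replicate_succ, List.cons_append, pvScan,
      pvPrefix_cons_ne c d k hk hd]
    simp only [Bool.false_eq_true, if_false]
    rw [ih (d :: acc)]
    congr 1
    rw [pvRep_shift]
    simp

theorem pvScan_c_run (c : Char) (k : Nat) (hk : 1 ≤ k) (m : Nat) (t acc : List Char)
    (ht : t.head? ≠ some c) :
    pvScan c k (List.replicate m c ++ t) acc =
      pvScan c k t (List.replicate (m % k + m / k) c ++ acc) := by
  induction m using Nat.strong_induction_on generalizing acc with
  | _ m ihm =>
    rcases Nat.lt_or_ge m k with hmk | hmk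
    · -- fewer than k c's: no match, step one char at a time
      cases m with
      | zero => simp
      | succ m =>
        have hpre : (List.replicate k c).isPrefixOf
            (List.replicate (m + 1) c ++ t) = false := by
          rw [Bool.eq_false_iff]
          intro h
          rw [pvPrefix_iff c k (m + 1) t ht] at h
          omega
        rw [List.replicate_succ, List.cons_append, pvScan]
        rw [List.replicate_succ, List.cons_append] at hpre
        rw [hpre]
        simp only [Bool.false_eq_true, if_false]
        rw [ihm m (by omega) (c :: acc)]
        congr 1
        have h1 : m % k + m / k + 1 = (m + 1) % k + (m + 1) / k := by
          rw [Nat.mod_eq_of_lt hmk, Nat.mod_eq_of_lt (by omega),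
            Nat.div_eq_of_lt hmk, Nat.div_eq_of_lt (by omega)]
        rw [← h1, pvRep_shift]
        simp [List.replicate_succ]
    · -- at least k c's: one match consumes k of them
      have hsplit : List.replicate m c ++ t =
          List.replicate k c ++ (List.replicate (m - k) c ++ t) := by
        rw [← List.append_assoc, ← List.replicate_add]
        congr 2
        omega
      obtain ⟨j, hj⟩ : ∃ j, k = j + 1 := ⟨k - 1, by omega⟩
      have hpre : (List.replicate k c).isPrefixOf (List.replicate m c ++ t) = true := by
        rw [pvPrefix_iff c k m t ht]
        exact hmk
      obtain ⟨mm, hmm⟩ : ∃ mm, m = mm + 1 := ⟨m - 1, by omega⟩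
      rw [hmm, List.replicate_succ, List.cons_append, pvScan]
      rw [hmm, List.replicate_succ, List.cons_append] at hpre
      rw [hpre]
      simp only [if_true]
      have hdrop : (List.replicate mm c ++ t).drop (k - 1) =
          List.replicate (m - k) c ++ t := by
        rw [List.drop_append_of_le_length (by rw [List.length_replicate]; omega)]
        rw [List.drop_replicate]
        have h9 : mm - (k - 1) = m - k := by omega
        rw [h9]
      rw [hdrop]
      rw [ihm (m - k) (by omega) (c :: acc)]
      congr 1
      have h1 : (m - k) % k = m % k := by
        conv_rhs => rw [← Nat.sub_add_cancel hmk]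
        rw [Nat.add_mod_right]
      have h2 : (m - k) / k + 1 = m / k :=
        (Nat.div_eq_sub_div (by omega) hmk).symm
      have h3 : (mm + 1) % k + (mm + 1) / k = (m - k) % k + (m - k) / k + 1 := by
        rw [← hmm]; omega
      rw [h3, pvRep_shift]
      simp [List.replicate_succ]

theorem pvHead_from (d : Char) (m : Nat) (rs : List (Char × Nat)) (hm : 1 ≤ m) :
    (pvFrom ((d, m) :: rs)).head? = some d := by
  obtain ⟨m', rfl⟩ : ∃ m', m = m' + 1 := ⟨m - 1, by omega⟩
  simp [pvFrom, List.replicate_succ]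

theorem pvFrom_cons (p : Char × Nat) (rs : List (Char × Nat)) :
    pvFrom (p :: rs) = List.replicate p.2 p.1 ++ pvFrom rs := by
  simp [pvFrom]

theorem pvChain_tail (p : Char × Nat) (rs : List (Char × Nat)) (h : pvChain (p :: rs)) :
    pvChain rs := by
  cases rs with
  | nil => exact List.isChain_nil
  | cons q rs2 => exact (List.isChain_cons_cons.mp h).2

theorem pvTail_head_ne (d : Char) (m : Nat) (rest : List (Char × Nat))
    (hpos' : pvPos rest) (hch : pvChain ((d, m) :: rest)) :
    (pvFrom rest).head? ≠ some d := by
  cases rest with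
  | nil => simp [pvFrom]
  | cons q rs2 =>
    obtain ⟨e, m2⟩ := q
    rw [pvHead_from e m2 rs2 (hpos' (e, m2) (by simp))]
    have hne : d ≠ e := (List.isChain_cons_cons.mp hch).1
    intro h
    exact hne (Option.some.inj h).symm

theorem pvScan_runs (c : Char) (k : Nat) (hk : 1 ≤ k) :
    ∀ (rs : List (Char × Nat)) (acc : List Char), pvPos rs → pvChain rs →
      pvScan c k (pvFrom rs) acc = acc.reverse ++ pvFrom (rs.map (pvF c k)) := by
  intro rs
  induction rs with
  | nil => intro acc _ _; simp [pvScan, pvFrom]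
  | cons p rest ih =>
    intro acc hpos hch
    obtain ⟨d, m⟩ := p
    have hpos' : pvPos rest := fun q hq => hpos q (List.mem_cons_of_mem _ hq)
    have hch' : pvChain rest := pvChain_tail _ _ hch
    have ht := pvTail_head_ne d m rest hpos' hch
    rw [pvFrom_cons]
    by_cases hdc : d = c
    · subst hdc
      rw [pvScan_c_run d k hk m (pvFrom rest) acc ht]
      rw [ih _ hpos' hch']
      have hF : pvF d k (d, m) = (d, m % k + m / k) := by simp [pvF]
      rw [List.map_cons, pvFrom_cons, hF]
      simp [List.reverse_append, List.reverse_replicate]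
    · rw [pvScan_nonc_run c k hk d hdc m (pvFrom rest) acc]
      rw [ih _ hpos' hch']
      have hF : pvF c k (d, m) = (d, m) := by simp [pvF, hdc]
      rw [List.map_cons, pvFrom_cons, hF]
      simp [List.reverse_append, List.reverse_replicate]

theorem pvReplace_runs (c : Char) (k : Nat) (hk : 1 ≤ k) (rs : List (Char × Nat))
    (hpos : pvPos rs) (hch : pvChain rs) :
    PySem.Chars.replace (pvFrom rs) (List.replicate k c) [c] = pvFrom (rs.map (pvF c k)) := by
  rw [pvReplace_eq_scan c k hk, pvScan_runs c k hk rs [] hpos hch]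
  simp

-- pvGroupby structure
theorem pvGroupby_cons (x : Char) (t : List Char) :
    ∃ m rs, pvGroupby (x :: t) = (x, m) :: rs ∧ 1 ≤ m := by
  induction t generalizing x with
  | nil => exact ⟨1, [], rfl, le_refl 1⟩
  | cons y t ih =>
    obtain ⟨m, rs, he, hm⟩ := ih y
    by_cases hxy : x = y
    · refine ⟨m + 1, rs, ?_, by omega⟩
      rw [show pvGroupby (x :: y :: t) = (match pvGroupby (y :: t) with
            | [] => [(x, 1)]
            | (d, m) :: rs => if x = d then (x, m + 1) :: rs else (x, 1) :: (d, m) :: rs) from rfl, he]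
      simp [hxy]
    · refine ⟨1, (y, m) :: rs, ?_, le_refl 1⟩
      rw [show pvGroupby (x :: y :: t) = (match pvGroupby (y :: t) with
            | [] => [(x, 1)]
            | (d, m) :: rs => if x = d then (x, m + 1) :: rs else (x, 1) :: (d, m) :: rs) from rfl, he]
      simp [hxy]

theorem pvGroupby_cons_eq (c : Char) (t : List Char) :
    pvGroupby (c :: t) = (match pvGroupby t with
      | [] => [(c, 1)]
      | (d, m) :: rs => if c = d then (c, m + 1) :: rs else (c, 1) :: (d, m) :: rs) := rfl

theorem pvGroupby_eq_nil (t : List Char) (h : pvGroupby t = []) : t = [] := by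
  cases t with
  | nil => rfl
  | cons x t =>
    obtain ⟨m, rs, he, -⟩ := pvGroupby_cons x t
    rw [he] at h
    cases h

theorem pvGroupby_head (t : List Char) (e : Char) (m : Nat) (rs : List (Char × Nat))
    (h : pvGroupby t = (e, m) :: rs) : t.head? = some e := by
  cases t with
  | nil => cases h
  | cons x t =>
    obtain ⟨m', rs', he, -⟩ := pvGroupby_cons x t
    rw [he] at h
    simp only [List.cons.injEq, Prod.mk.injEq] at h
    rw [List.head?_cons, h.1.1]

theorem pvFrom_groupby (l : List Char) : pvFrom (pvGroupby l) = l := by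
  induction l with
  | nil => rfl
  | cons c t ih =>
    rw [pvGroupby_cons_eq]
    cases he : pvGroupby t with
    | nil =>
      rw [pvGroupby_eq_nil t he]
      simp [pvFrom]
    | cons p rs =>
      obtain ⟨d, m⟩ := p
      by_cases hcd : c = d
      · simp only [if_pos hcd]
        subst hcd
        have h2 : pvFrom ((c, m + 1) :: rs) = c :: pvFrom ((c, m) :: rs) := by
          simp [pvFrom, List.replicate_succ]
        rw [h2, ← he, ih]
      · simp only [if_neg hcd]
        have h2 : pvFrom ((c, 1) :: (d, m) :: rs) = c :: pvFrom ((d, m) :: rs) := by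
          simp [pvFrom]
        rw [h2, ← he, ih]

theorem pvPos_groupby (l : List Char) : pvPos (pvGroupby l) := by
  induction l with
  | nil => intro p hp; cases hp
  | cons c t ih =>
    rw [pvGroupby_cons_eq]
    cases he : pvGroupby t with
    | nil => intro p hp; simp at hp; simp [hp]
    | cons q rs =>
      obtain ⟨d, m⟩ := q
      have ih' : pvPos ((d, m) :: rs) := he ▸ ih
      by_cases hcd : c = d
      · simp only [if_pos hcd]
        intro p hp
        rcases List.mem_cons.mp hp with h | h
        · simp [h]
        · exact ih' p (List.mem_cons_of_mem _ h)
      · simp only [if_neg hcd]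
        intro p hp
        rcases List.mem_cons.mp hp with h | h
        · simp [h]
        · exact ih' p h

theorem pvChain_groupby (l : List Char) : pvChain (pvGroupby l) := by
  induction l with
  | nil => exact List.isChain_nil
  | cons c t ih =>
    rw [pvGroupby_cons_eq]
    cases he : pvGroupby t with
    | nil => exact List.isChain_singleton _
    | cons q rs =>
      obtain ⟨d, m⟩ := q
      have ih' : pvChain ((d, m) :: rs) := he ▸ ih
      by_cases hcd : c = d
      · simp only [if_pos hcd]
        subst hcd
        cases rs with
        | nil => exact List.isChain_singleton _
        | cons q2 rs2 =>
          have h2 := List.isChain_cons_cons.mp ih'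
          exact List.isChain_cons_cons.mpr ⟨h2.1, h2.2⟩
      · simp only [if_neg hcd]
        exact List.isChain_cons_cons.mpr ⟨hcd, ih'⟩

theorem pvGroupby_replicate_append (d : Char) (a : Nat) (ha : 1 ≤ a) (t : List Char)
    (ht : t.head? ≠ some d) :
    pvGroupby (List.replicate a d ++ t) = (d, a) :: pvGroupby t := by
  obtain ⟨b, rfl⟩ : ∃ b, a = b + 1 := ⟨a - 1, by omega⟩
  clear ha
  induction b with
  | zero =>
    show pvGroupby (d :: t) = (d, 1) :: pvGroupby t
    rw [pvGroupby_cons_eq]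
    cases he : pvGroupby t with
    | nil => rfl
    | cons q rs =>
      obtain ⟨e, m⟩ := q
      have hh := pvGroupby_head t e m rs he
      have hde : ¬ d = e := by
        intro h
        rw [h] at ht
        exact ht hh
      simp [hde]
  | succ b ihb =>
    have h1 : List.replicate (b + 1 + 1) d ++ t = d :: (List.replicate (b + 1) d ++ t) := by
      rw [List.replicate_succ]
      rfl
    rw [h1, pvGroupby_cons_eq, ihb]
    simp

theorem pvGroupby_from (rs : List (Char × Nat)) (hpos : pvPos rs) (hch : pvChain rs) :
    pvGroupby (pvFrom rs) = rs := by
  induction rs with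
  | nil => rfl
  | cons p rest ih =>
    obtain ⟨d, m⟩ := p
    have hm : 1 ≤ m := hpos (d, m) (by simp)
    have hpos' : pvPos rest := fun q hq => hpos q (List.mem_cons_of_mem _ hq)
    have hch' : pvChain rest := pvChain_tail _ _ hch
    have ht : (pvFrom rest).head? ≠ some d := by
      cases rest with
      | nil => simp [pvFrom]
      | cons q rs2 =>
        obtain ⟨e, m2⟩ := q
        rw [pvHead_from e m2 rs2 (hpos' (e, m2) (by simp))]
        have hne : d ≠ e := (List.isChain_cons_cons.mp hch).1
        intro h
        exact hne (Option.some.inj h).symm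
    rw [pvFrom_cons]
    rw [pvGroupby_replicate_append d m hm _ ht, ih hpos' hch']

-- pointwise facts about pvF / pvFof
theorem pvF_fst (c : Char) (k : Nat) (p : Char × Nat) : (pvF c k p).1 = p.1 := by
  unfold pvF; split <;> rfl

theorem pvF_pos (c : Char) (k : Nat) (hk : 2 ≤ k) (p : Char × Nat) (hp : 1 ≤ p.2) :
    1 ≤ (pvF c k p).2 := by
  unfold pvF
  split
  · show 1 ≤ p.2 % k + p.2 / k
    rcases Nat.lt_or_ge p.2 k with h | h
    · rw [Nat.mod_eq_of_lt h]
      exact le_trans hp (Nat.le_add_right _ _)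
    · have : 1 ≤ p.2 / k := (Nat.one_le_div_iff (by omega)).2 h
      omega
  · exact hp

theorem pvF_le (c : Char) (k : Nat) (hk : 1 ≤ k) (p : Char × Nat) : (pvF c k p).2 ≤ p.2 := by
  unfold pvF
  split
  · show p.2 % k + p.2 / k ≤ p.2
    have h1 := Nat.div_add_mod p.2 k
    have h2 : p.2 / k ≤ k * (p.2 / k) := Nat.le_mul_of_pos_left _ (by omega)
    omega
  · exact le_refl _

theorem pvFof_fst (gs : List (Char × Nat)) (p : Char × Nat) : (pvFof gs p).1 = p.1 := by
  induction gs generalizing p with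
  | nil => rfl
  | cons g gs ih =>
    show (pvFof gs _).1 = _
    rw [ih]
    split <;> simp [pvF_fst]

theorem pvFof_pos (gs : List (Char × Nat)) (p : Char × Nat) (hp : 1 ≤ p.2) :
    1 ≤ (pvFof gs p).2 := by
  induction gs generalizing p with
  | nil => exact hp
  | cons g gs ih =>
    show 1 ≤ (pvFof gs _).2
    apply ih
    split
    · next h =>
      simp only [Bool.and_eq_true, decide_eq_true_eq] at h
      exact pvF_pos g.1 g.2 (by omega) p hp
    · exact hp

theorem pvFof_le (gs : List (Char × Nat)) (p : Char × Nat) : (pvFof gs p).2 ≤ p.2 := by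
  induction gs generalizing p with
  | nil => exact le_refl _
  | cons g gs ih =>
    show (pvFof gs _).2 ≤ _
    refine le_trans (ih _) ?_
    split
    · next h =>
      simp only [Bool.and_eq_true, decide_eq_true_eq] at h
      exact pvF_le g.1 g.2 (by omega) p
    · exact le_refl _

theorem pvFof_good_fix (gs : List (Char × Nat)) (p : Char × Nat) (hg : pvGood p) :
    pvFof gs p = p := by
  induction gs generalizing p with
  | nil => rfl
  | cons g gs ih =>
    show pvFof gs _ = p
    have hfix : (if pvSpec g.1 && decide (g.2 > 1) then pvF g.1 g.2 p else p) = p := by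
      split
      · next h =>
        simp only [Bool.and_eq_true, decide_eq_true_eq] at h
        unfold pvF
        split
        · next he =>
          have hs : pvSpec p.1 = true := by rw [he]; exact h.1
          have h1 := hg hs
          have h2 : p.2 % g.2 + p.2 / g.2 = p.2 := by
            rw [h1, Nat.mod_eq_of_lt (by omega), Nat.div_eq_of_lt (by omega)]
          rw [h2]
        · rfl
      · rfl
    rw [hfix]; exact ih p hg

theorem pvShadow_map_Fof (gs : List (Char × Nat)) (rs : List (Char × Nat)) :
    pvShadow (rs.map (pvFof gs)) = pvShadow rs := by
  unfold pvShadow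
  rw [List.map_map]
  apply List.map_congr_left
  intro p _
  simp only [Function.comp_apply]
  by_cases hs : pvSpec p.1 = true
  · rw [if_pos (by rw [pvFof_fst]; exact hs), if_pos hs, pvFof_fst]
  · rw [if_neg (by rw [pvFof_fst]; exact hs), if_neg hs]
    exact pvFof_good_fix gs p (fun h => absurd h hs)

theorem pvMem_spec (c : Char) : c ∈ (['*', '?'] : List Char) ↔ pvSpec c = true := by
  simp [pvSpec]

theorem pvChain_map_fst (F : Char × Nat → Char × Nat) (hF : ∀ p, (F p).1 = p.1)
    (rs : List (Char × Nat)) (hch : pvChain rs) : pvChain (rs.map F) := by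
  apply List.isChain_map_of_isChain
  · intro a b hab
    rw [hF, hF]
    exact hab
  · exact hch

theorem pvPos_map_F (c : Char) (k : Nat) (hk : 2 ≤ k) (rs : List (Char × Nat))
    (hpos : pvPos rs) : pvPos (rs.map (pvF c k)) := by
  intro q hq
  obtain ⟨p, hp, rfl⟩ := List.mem_map.mp hq
  exact pvF_pos c k hk p (hpos p hp)

-- the inner loop of A, read on runs: it is a pointwise map over the run list
theorem pvInner_eq_map (gs : List (Char × Nat)) :
    ∀ rs : List (Char × Nat), pvPos rs → pvChain rs →
      gs.foldl
        (fun cs p =>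
          if p.1 ∈ (['*', '?'] : List Char) then
            (if p.2 > 1 then PySem.Chars.replace cs (List.replicate p.2 p.1) [p.1] else cs)
          else cs)
        (pvFrom rs) = pvFrom (rs.map (pvFof gs)) := by
  induction gs with
  | nil =>
    intro rs _ _
    rw [List.foldl_nil]
    have hmap : rs.map (pvFof []) = rs := by
      rw [List.map_congr_left (fun p _ => (rfl : pvFof [] p = p))]
      exact List.map_id' rs
    rw [hmap]
  | cons g gs ih =>
    intro rs hpos hch
    rw [List.foldl_cons]
    by_cases hsp : pvSpec g.1 = true
    · by_cases hk2 : g.2 > 1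
      · have hcond : (pvSpec g.1 && decide (g.2 > 1)) = true := by
          rw [hsp]
          simp [hk2]
        rw [if_pos ((pvMem_spec g.1).mpr hsp), if_pos hk2,
          pvReplace_runs g.1 g.2 (by omega) rs hpos hch]
        rw [ih (rs.map (pvF g.1 g.2)) (pvPos_map_F g.1 g.2 (by omega) rs hpos)
          (pvChain_map_fst _ (pvF_fst g.1 g.2) rs hch)]
        rw [List.map_map]
        congr 1
        apply List.map_congr_left
        intro p _
        show pvFof gs (pvF g.1 g.2 p) = pvFof (g :: gs) p
        simp [pvFof, hcond]
      · have hcond : (pvSpec g.1 && decide (g.2 > 1)) = false := by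
          simp [hk2]
        rw [if_pos ((pvMem_spec g.1).mpr hsp), if_neg hk2, ih rs hpos hch]
        congr 1
        apply List.map_congr_left
        intro p _
        show pvFof gs p = pvFof (g :: gs) p
        simp [pvFof, hcond]
    · have hcond : (pvSpec g.1 && decide (g.2 > 1)) = false := by
        simp [hsp]
      rw [if_neg (fun hmem => hsp ((pvMem_spec g.1).mp hmem)), ih rs hpos hch]
      congr 1
      apply List.map_congr_left
      intro p _
      show pvFof gs p = pvFof (g :: gs) p
      simp [pvFof, hcond]

theorem pvGoodUpto_of_nonpos (i : Int) (hi : i ≤ 0) (rs : List (Char × Nat)) :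
    pvGoodUpto i rs := by
  induction rs generalizing i with
  | nil => trivial
  | cons p rs ih =>
    refine ⟨fun _ _ => hi, ih _ (by omega)⟩

-- the invariant step: after processing the groups of the suffix from offset i,
-- every bad run starts at offset ≥ i+1
theorem pvStep_good :
    ∀ (rs : List (Char × Nat)) (i : Nat), pvPos rs → pvChain rs → pvGoodUpto i rs →
      pvGoodUpto (i + 1) (rs.map (pvFof (pvGroupby ((pvFrom rs).drop i)))) := by
  intro rs
  induction rs with
  | nil => intro i _ _ _; exact trivial
  | cons q rest ih =>
    intro i hpos hch hgu
    obtain ⟨d, m⟩ := q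
    have hm : 1 ≤ m := hpos (d, m) (by simp)
    have hpos' : pvPos rest := fun r hr => hpos r (List.mem_cons_of_mem _ hr)
    have hch' : pvChain rest := pvChain_tail _ _ hch
    have ht := pvTail_head_ne d m rest hpos' hch
    rw [pvFrom_cons]
    rcases Nat.lt_or_ge i m with him | hmi
    · -- offset i falls inside the head run
      have hd2 : (List.replicate m d ++ pvFrom rest).drop i =
          List.replicate (m - i) d ++ pvFrom rest := by
        rw [List.drop_append, List.drop_replicate, List.length_replicate,
          show i - m = 0 from by omega, List.drop_zero]
      rw [hd2, pvGroupby_replicate_append d (m - i) (by omega) _ ht,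
        pvGroupby_from rest hpos' hch']
      by_cases hb : pvSpec d = true ∧ 2 ≤ m
      · -- the head run is bad: it starts exactly at i, so i = 0 and it collapses to 1
        have hi0 : i = 0 := by
          have := hgu.1 hb.1 hb.2
          omega
        subst hi0
        rw [show m - 0 = m from by omega]
        have hcond : (pvSpec d && decide (m > 1)) = true := by
          rw [hb.1]
          simp
          omega
        have hhead : pvFof ((d, m) :: rest) (d, m) = (d, 1) := by
          show pvFof rest (if (pvSpec (d, m).1 && decide ((d, m).2 > 1)) then pvF (d, m).1 (d, m).2 (d, m) else (d, m)) = (d, 1)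
          rw [if_pos hcond]
          have hF : pvF d m (d, m) = (d, 1) := by
            simp [pvF, Nat.mod_self, Nat.div_self (show 0 < m by omega)]
          rw [hF]
          exact pvFof_good_fix _ _ (fun _ => rfl)
        rw [List.map_cons, hhead]
        refine ⟨fun _ h2 => by omega, ?_⟩
        exact pvGoodUpto_of_nonpos _ (by simp) _
      · -- the head run is good: untouched, and it reaches past offset i
        have hgood : pvGood (d, m) := by
          intro hs
          have : ¬ 2 ≤ m := fun h2 => hb ⟨hs, h2⟩
          omega
        rw [List.map_cons, pvFof_good_fix _ _ hgood]
        refine ⟨fun hs h2 => absurd ⟨hs, h2⟩ hb, ?_⟩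
        apply pvGoodUpto_of_nonpos
        simp only
        omega
    · -- the head run lies strictly before offset i: it is untouched
      have hd2 : (List.replicate m d ++ pvFrom rest).drop i = (pvFrom rest).drop (i - m) := by
        rw [List.drop_append, List.drop_replicate, List.length_replicate,
          show m - i = 0 from by omega, List.replicate_zero, List.nil_append]
      rw [hd2]
      have hgood : pvGood (d, m) := by
        intro hs
        by_contra hne
        have h2 : 2 ≤ m := by omega
        have h3 := hgu.1 hs h2
        omega
      rw [List.map_cons, pvFof_good_fix _ _ hgood]
      refine ⟨?_, ?_⟩
      · intro hs h2
        have := hgood hs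
        omega
      · have hcast : ((i - m : Nat) : Int) = (i : Int) - (m : Int) := by omega
        have hgu' : pvGoodUpto ((i - m : Nat) : Int) rest := by
          rw [hcast]
          exact hgu.2
        have := ih (i - m) hpos' hch' hgu'
        have hcast2 : ((i - m : Nat) : Int) + 1 = (i : Int) + 1 - ((d, m) : Char × Nat).2 := by
          simp only
          omega
        rw [hcast2] at this
        exact this

theorem pvAllGood_of_goodUpto (rs : List (Char × Nat)) (hpos : pvPos rs) :
    ∀ i : Int, pvGoodUpto i rs → (pvSum rs : Int) ≤ i → ∀ p ∈ rs, pvGood p := by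
  induction rs with
  | nil => intro i _ _ p hp; cases hp
  | cons q rest ih =>
    intro i hgu hsum p hp
    have hq2 : 1 ≤ q.2 := hpos q (by simp)
    have hsum' : pvSum (q :: rest) = q.2 + pvSum rest := by simp [pvSum]
    rcases List.mem_cons.mp hp with h | h
    · subst h
      intro hs
      by_contra hne
      have h2 : 2 ≤ p.2 := by omega
      have h3 := hgu.1 hs h2
      rw [hsum'] at hsum
      have h4 : (0 : Int) ≤ pvSum rest := Int.natCast_nonneg _
      omega
    · exact ih (fun r hr => hpos r (List.mem_cons_of_mem _ hr)) (i - q.2) hgu.2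
        (by rw [hsum'] at hsum; push_cast at hsum ⊢; omega) p h

theorem pvShadow_fix (rs : List (Char × Nat)) (h : ∀ p ∈ rs, pvGood p) :
    pvShadow rs = rs := by
  unfold pvShadow
  have hpt : ∀ p ∈ rs, (if pvSpec p.1 then (p.1, (1 : Nat)) else p) = p := by
    intro p hp
    split
    · next hs =>
      have h1 := h p hp hs
      rw [← h1]
    · rfl
  rw [List.map_congr_left hpt]; simp

theorem pvLength_from (rs : List (Char × Nat)) : (pvFrom rs).length = pvSum rs := by
  unfold pvFrom pvSum
  induction rs with
  | nil => rfl
  | cons p rs ih => simp [ih]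

theorem pvShadow_flatMap (rs : List (Char × Nat)) :
    pvFrom (pvShadow rs) = rs.flatMap
      (fun p => if p.1 == '*' || p.1 == '?' then [p.1] else List.replicate p.2 p.1) := by
  induction rs with
  | nil => rfl
  | cons p rest ih =>
    show pvFrom ((if pvSpec p.1 then (p.1, 1) else p) :: pvShadow rest) = _
    rw [pvFrom_cons, List.flatMap_cons, ih]
    congr 1
    by_cases hs : pvSpec p.1 = true
    · rw [hs]
      unfold pvSpec at hs
      simp [hs]
    · rw [if_neg hs]
      unfold pvSpec at hs
      simp only [Bool.not_eq_true] at hs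
      rw [hs]
      simp

theorem pvSum_map_Fof (gs rs : List (Char × Nat)) : pvSum (rs.map (pvFof gs)) ≤ pvSum rs := by
  unfold pvSum
  rw [List.map_map]
  apply List.sum_le_sum
  intro p _
  exact pvFof_le gs p

-- the outer loop, by induction on the remaining iterations
theorem pvOuter (n : Nat) :
    ∀ (fuel j : Nat) (rs : List (Char × Nat)), j + fuel = n →
      pvPos rs → pvChain rs → pvGoodUpto j rs → pvSum rs ≤ n →
      (PySem.List.pyRange j n 1).foldl
        (fun cs i =>
          (pvGroupby (PySem.Chars.slice cs (some i) none)).foldl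
            (fun cs p =>
              if p.1 ∈ (['*', '?'] : List Char) then
                (if p.2 > 1 then PySem.Chars.replace cs (List.replicate p.2 p.1) [p.1] else cs)
              else cs)
            cs)
        (pvFrom rs) = pvFrom (pvShadow rs) := by
  intro fuel
  induction fuel with
  | zero =>
    intro j rs hjn hpos hch hgu hsum
    have hj : j = n := by omega
    subst hj
    rw [show PySem.List.pyRange (j : Int) (j : Int) 1 = [] from by simp [PySem.List.pyRange]]
    rw [List.foldl_nil]
    have hall : ∀ p ∈ rs, pvGood p :=
      pvAllGood_of_goodUpto rs hpos j hgu (by exact_mod_cast hsum)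
    rw [pvShadow_fix rs hall]
  | succ fuel ih =>
    intro j rs hjn hpos hch hgu hsum
    have hjl : (j : Int) < (n : Int) := by omega
    rw [PySem.List.pyRange_one_cons hjl, List.foldl_cons]
    have hslice : PySem.Chars.slice (pvFrom rs) (some (j : Int)) none = (pvFrom rs).drop j := by
      rw [PySem.Chars.slice_eq_listSlice, PySem.List.slice_from_natCast]
    rw [hslice]
    rw [pvInner_eq_map (pvGroupby ((pvFrom rs).drop j)) rs hpos hch]
    have hpos2 : pvPos (rs.map (pvFof (pvGroupby ((pvFrom rs).drop j)))) := by
      intro q hq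
      obtain ⟨p, hp, rfl⟩ := List.mem_map.mp hq
      exact pvFof_pos _ p (hpos p hp)
    have hch2 := pvChain_map_fst _ (pvFof_fst (pvGroupby ((pvFrom rs).drop j))) rs hch
    have hgu2 := pvStep_good rs j hpos hch hgu
    have hsum2 := le_trans (pvSum_map_Fof (pvGroupby ((pvFrom rs).drop j)) rs) hsum
    have hcast : (j : Int) + 1 = ((j + 1 : Nat) : Int) := by push_cast; ring
    rw [hcast] at hgu2 ⊢
    have := ih (j + 1) (rs.map (pvFof (pvGroupby ((pvFrom rs).drop j)))) (by omega)
      hpos2 hch2 hgu2 hsum2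
    rw [this, pvShadow_map_Fof]

-- ===== VERDICT (by name: the statement is the Claim_ definition above) =====
theorem PrepareString_spec : Claim_equal_PrepareString := by
  intro string eclist _
  unfold Spec_PrepareString PrepareString PrepareString_alt
  simp only
  rw [← pvShadow_flatMap]
  have h0 : pvFrom (pvGroupby (pvSubst string eclist).toList) = (pvSubst string eclist).toList :=
    pvFrom_groupby _
  conv_lhs =>
    rw [← h0]
  rw [show ((0 : Int)) = (((0 : Nat)) : Int) from rfl]
  rw [pvLength_from]
  rw [pvOuter (pvSum (pvGroupby (pvSubst string eclist).toList)) (pvSum (pvGroupby (pvSubst string eclist).toList)) 0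
    (pvGroupby (pvSubst string eclist).toList) (by omega) (pvPos_groupby _) (pvChain_groupby _)
    (pvGoodUpto_of_nonpos 0 (by omega) _) (le_refl _)]
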